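-- pv_equiv track=rewrite | github.com/siebeniris/vec2text_exp | language_confusion/preprocessing_for_regression.py | get_lang2lang_family_dict
-- ===== SOURCE A (Python) =====
-- from itertools import product
--
-- lang2fam = {
--     'amh_Ethi': 'semitic',
--     'arb_Arab': 'semitic',
--     'cmn_Hani': 'atlatic',
--     'deu_Latn': 'germanic',
--     'fin_Latn': 'uralic',
--     'guj_Gujr': 'indo',
--     'heb_Hebr': 'semitic',
--     'hin_Deva': 'indo',
--     'hun_Latn': 'uralic',
--     'jpn_Jpan': 'atlatic',
--     'kaz_Cyrl': 'turkic',
--     'kor_Hang': 'atlatic',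
--     'mhr_Cyrl': 'uralic',
--     'mlt_Latn': 'semitic',
--     'mon_Cyrl': 'atlatic',
--     'pan_Guru': 'indo',
--     'sin_Sinh': 'indo',
--     'tur_Latn': 'turkic',
--     'urd_Arab': 'indo',
--     'ydd_Hebr': 'germanic'
--
-- }
--
-- def get_lang2lang_family_dict(eval_langs_list):
--     lang2lang_family = dict()
--     for lang1, lang2 in product(eval_langs_list, repeat=2):
--
--         if lang1 not in lang2lang_family:
--             lang2lang_family[lang1] = dict()
--
--         if lang2fam[lang1] == lang2fam[lang2]:
--             lang2lang_family[lang1][lang2] = 1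
--         else:
--             lang2lang_family[lang1][lang2] = 0
--     return lang2lang_family
-- ===== SOURCE B (Python) =====
-- lang2fam = {
--     'amh_Ethi': 'semitic',
--     'arb_Arab': 'semitic',
--     'cmn_Hani': 'atlatic',
--     'deu_Latn': 'germanic',
--     'fin_Latn': 'uralic',
--     'guj_Gujr': 'indo',
--     'heb_Hebr': 'semitic',
--     'hin_Deva': 'indo',
--     'hun_Latn': 'uralic',
--     'jpn_Jpan': 'atlatic',
--     'kaz_Cyrl': 'turkic',
--     'kor_Hang': 'atlatic',
--     'mhr_Cyrl': 'uralic',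
--     'mlt_Latn': 'semitic',
--     'mon_Cyrl': 'atlatic',
--     'pan_Guru': 'indo',
--     'sin_Sinh': 'indo',
--     'tur_Latn': 'turkic',
--     'urd_Arab': 'indo',
--     'ydd_Hebr': 'germanic'
--
-- }
--
-- def get_lang2lang_family_dict(eval_langs_list):
--     # group the languages by family (one lang2fam lookup per language)
--     fams = {}
--     for lang in eval_langs_list:
--         fams.setdefault(lang2fam[lang], []).append(lang)
--     # initialize every ordered pair to 0
--     result = {l1: {l2: 0 for l2 in eval_langs_list} for l1 in eval_langs_list}
--     # mark ordered pairs inside the same family group with 1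
--     for members in fams.values():
--         for l1 in members:
--             for l2 in members:
--                 result[l1][l2] = 1
--     return result
-- ===== Notes on version B (the rewrite author's own statement) =====
-- stated objective: alternative
-- what changed: Instead of iterating over all ordered pairs and comparing the two family lookups per pair, B groups the languages by family once, initializes the whole nested dict to 0, and writes 1 only for ordered pairs inside the same family group.
import Mathlib
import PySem

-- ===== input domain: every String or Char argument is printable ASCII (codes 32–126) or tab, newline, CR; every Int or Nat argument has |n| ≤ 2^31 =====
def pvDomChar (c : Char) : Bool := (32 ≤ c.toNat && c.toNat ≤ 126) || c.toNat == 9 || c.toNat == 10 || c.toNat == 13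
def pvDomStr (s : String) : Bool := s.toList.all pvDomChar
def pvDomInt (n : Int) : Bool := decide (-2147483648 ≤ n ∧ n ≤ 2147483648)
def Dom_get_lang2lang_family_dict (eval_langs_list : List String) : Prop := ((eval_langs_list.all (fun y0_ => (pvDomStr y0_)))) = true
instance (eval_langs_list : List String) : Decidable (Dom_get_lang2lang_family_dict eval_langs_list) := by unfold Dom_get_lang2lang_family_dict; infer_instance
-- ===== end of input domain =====

-- B builds a family→members index once, initializes the whole nested dict to 0, and writes 1 only
-- for ordered pairs inside the same family group (alternative decomposition, not claimed faster).

-- the module-level lang2fam table (shared data, used by both ports)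
def pvLang2fam : PySem.Dict String String := PySem.Dict.ofList [
  ("amh_Ethi", "semitic"), ("arb_Arab", "semitic"), ("cmn_Hani", "atlatic"),
  ("deu_Latn", "germanic"), ("fin_Latn", "uralic"), ("guj_Gujr", "indo"),
  ("heb_Hebr", "semitic"), ("hin_Deva", "indo"), ("hun_Latn", "uralic"),
  ("jpn_Jpan", "atlatic"), ("kaz_Cyrl", "turkic"), ("kor_Hang", "atlatic"),
  ("mhr_Cyrl", "uralic"), ("mlt_Latn", "semitic"), ("mon_Cyrl", "atlatic"),
  ("pan_Guru", "indo"), ("sin_Sinh", "indo"), ("tur_Latn", "turkic"),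
  ("urd_Arab", "indo"), ("ydd_Hebr", "germanic")]

-- ===== PORT A =====
-- lang2fam[l] raises KeyError for unknown languages: Pre_ excludes those inputs, so the getD default is never read
def get_lang2lang_family_dict (eval_langs_list : List String) : List (String × List (String × Int)) :=
  let d := (eval_langs_list.flatMap (fun lang1 => eval_langs_list.map (fun lang2 => (lang1, lang2)))).foldl
    (fun d p =>
      let d := if d.contains p.1 then d else d.insert p.1 PySem.Dict.empty
      d.modify p.1 PySem.Dict.empty (fun inner =>
        inner.insert p.2 (if pvLang2fam.getD p.1 "" == pvLang2fam.getD p.2 "" then (1 : Int) else 0)))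
    PySem.Dict.empty
  d.items.map (fun q => (q.1, q.2.items))

-- ===== PORT B =====
def get_lang2lang_family_dict_alt (eval_langs_list : List String) : List (String × List (String × Int)) :=
  -- group the languages by family
  let fams := eval_langs_list.foldl
    (fun g lang => g.modify (pvLang2fam.getD lang "") [] (fun ms => ms ++ [lang])) PySem.Dict.empty
  -- initialize every ordered pair to 0
  let result := eval_langs_list.foldl
    (fun r l1 => r.insert l1 (eval_langs_list.foldl (fun i l2 => i.insert l2 (0 : Int)) PySem.Dict.empty))
    PySem.Dict.empty
  -- mark ordered pairs inside the same family group with 1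
  let result := fams.values.foldl
    (fun r members =>
      members.foldl (fun r l1 =>
        members.foldl (fun r l2 => r.modify l1 PySem.Dict.empty (fun inner => inner.insert l2 (1 : Int))) r) r)
    result
  result.items.map (fun q => (q.1, q.2.items))

-- ===== PRECONDITION & SPEC =====
-- Pre_ excludes exactly the inputs containing a language missing from lang2fam, on which Python A raises KeyError
def Pre_get_lang2lang_family_dict (eval_langs_list : List String) : Prop :=
  ∀ l ∈ eval_langs_list, pvLang2fam.contains l = true
instance (eval_langs_list : List String) : Decidable (Pre_get_lang2lang_family_dict eval_langs_list) := by
  unfold Pre_get_lang2lang_family_dict; infer_instance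
def pvWitness_get_lang2lang_family_dict : List String := ["deu_Latn", "ydd_Hebr", "fin_Latn", "deu_Latn"]
def Spec_get_lang2lang_family_dict (eval_langs_list : List String) (out : List (String × List (String × Int))) : Prop := out = get_lang2lang_family_dict_alt eval_langs_list
instance (eval_langs_list : List String) (out : List (String × List (String × Int))) : Decidable (Spec_get_lang2lang_family_dict eval_langs_list out) := by unfold Spec_get_lang2lang_family_dict; infer_instance

-- ===== CLAIM (what is proved, stated in full; the proofs are below) =====
def Claim_equal_get_lang2lang_family_dict : Prop := ∀ (eval_langs_list : List String), Dom_get_lang2lang_family_dict eval_langs_list → Pre_get_lang2lang_family_dict eval_langs_list → Spec_get_lang2lang_family_dict eval_langs_list (get_lang2lang_family_dict eval_langs_list)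

-- ===== LEMMAS AND PROOFS =====

-- an explicit dict: keys ks (kept Nodup), value g k at key k
def pvTab {ν : Type} (ks : List String) (g : String → ν) : PySem.Dict String ν :=
  PySem.Dict.mk (ks.map (fun k => (k, g k)))

theorem pvTab_keys {ν : Type} (ks : List String) (g : String → ν) : (pvTab ks g).keys = ks := by
  simp [pvTab, PySem.Dict.keys]
  exact List.map_id ks

theorem pvTab_congr {ν : Type} {ks : List String} {g g' : String → ν}
    (h : ∀ k ∈ ks, g k = g' k) : pvTab ks g = pvTab ks g' := by
  apply PySem.Dict.ext
  simp only [pvTab]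
  exact List.map_congr_left (fun k hk => by rw [h k hk])

theorem pvTab_getD {ν : Type} {ks : List String} (g : String → ν) {k : String}
    (hnd : ks.Nodup) (hk : k ∈ ks) (d0 : ν) : (pvTab ks g).getD k d0 = g k := by
  apply PySem.Dict.getD_of_mem_items
  · exact (List.mem_map).mpr ⟨k, hk, rfl⟩
  · rw [pvTab_keys]; exact hnd

theorem pvTab_contains {ν : Type} (ks : List String) (g : String → ν) (k : String) :
    (pvTab ks g).contains k = decide (k ∈ ks) := by
  rw [PySem.Dict.contains_eq_decide_mem_keys, pvTab_keys]

theorem pvTab_insert_mem {ν : Type} {ks : List String} (g : String → ν) {k : String} (v : ν)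
    (hnd : ks.Nodup) (hk : k ∈ ks) :
    (pvTab ks g).insert k v = pvTab ks (fun x => if x = k then v else g x) := by
  apply PySem.Dict.ext
  rw [PySem.Dict.items_insert_of_contains _ _ (by rw [pvTab_contains]; exact decide_eq_true hk)]
  show (ks.map (fun x => (x, g x))).map _ = ks.map _
  rw [List.map_map]
  apply List.map_congr_left
  intro x _
  by_cases hx : x = k
  · subst hx; simp
  · simp [hx]

theorem pvTab_insert_not_mem {ν : Type} {ks : List String} (g : String → ν) {k : String} (v : ν)
    (hk : k ∉ ks) :
    (pvTab ks g).insert k v = pvTab (ks ++ [k]) (fun x => if x = k then v else g x) := by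
  apply PySem.Dict.ext
  rw [PySem.Dict.items_insert_of_not_contains _ _
        (by rw [pvTab_contains]; exact decide_eq_false hk)]
  show ks.map (fun x => (x, g x)) ++ [(k, v)] = (ks ++ [k]).map _
  rw [List.map_append]
  congr 1
  · apply List.map_congr_left
    intro x hx
    have : x ≠ k := fun h => hk (h ▸ hx)
    simp [this]
  · simp

-- a Set.update by elements already present is the identity
theorem pvUpdate_of_subset {ks l : List String} (h : ∀ x ∈ l, x ∈ ks) :
    PySem.Set.update ks l = ks := by
  rw [PySem.Set.update_eq_append_filter]
  have : (PySem.Set.ofList l).filter (fun y => !(PySem.Set.contains ks y)) = [] := by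
    apply List.filter_eq_nil_iff.mpr
    intro y hy
    have hyl : y ∈ l := (PySem.Set.mem_ofList _ _).mp hy
    simp [h y hyl]
  rw [this, List.append_nil]

-- overwrite loop with a value depending only on the key
theorem pvBR {ν : Type} {ks : List String} (g : String → ν) (w : String → ν) (xs : List String)
    (hnd : ks.Nodup) :
    xs.foldl (fun i b => i.insert b (w b)) (pvTab ks g)
      = pvTab (PySem.Set.update ks xs) (fun x => if x ∈ xs then w x else g x) := by
  induction xs generalizing ks g with
  | nil =>
    rw [PySem.Set.update_nil]
    exact (pvTab_congr (fun k _ => by simp)).symm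
  | cons x xs ih =>
    rw [List.foldl_cons, PySem.Set.update_cons]
    by_cases hx : x ∈ ks
    · rw [pvTab_insert_mem g (w x) hnd hx, PySem.Set.add_of_mem hx, ih _ hnd]
      apply pvTab_congr
      intro k hk
      by_cases h1 : k ∈ xs
      · simp [h1]
      · by_cases h2 : k = x <;> simp [h1, h2]
    · rw [pvTab_insert_not_mem g (w x) hx, PySem.Set.add_of_not_mem hx,
          ih _ (by simp [List.nodup_append, hnd]; exact fun a ha h => hx (h ▸ ha))]
      apply pvTab_congr
      intro k hk
      by_cases h1 : k ∈ xs
      · simp [h1]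
      · by_cases h2 : k = x <;> simp [h1, h2]

-- inner-loop shape shared by A's row updates and B's innermost loop
theorem pvIL (a : String) (w : String → Int) (bs : List String)
    (d : PySem.Dict String (PySem.Dict String Int)) (i : PySem.Dict String Int) :
    bs.foldl (fun d b => d.insert a ((d.getD a PySem.Dict.empty).insert b (w b))) (d.insert a i)
      = d.insert a (bs.foldl (fun i b => i.insert b (w b)) i) := by
  induction bs generalizing d i with
  | nil => rfl
  | cons b bs ih =>
    rw [List.foldl_cons, List.foldl_cons, PySem.Dict.getD_insert_self,
        PySem.Dict.insert_insert_self, ih]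

-- ---- A side ----

def pvRow (f : String → String) (xs : List String) (a : String) : PySem.Dict String Int :=
  pvTab (PySem.Set.ofList xs) (fun b => if f a == f b then (1 : Int) else 0)

def pvStepA (f : String → String) (d : PySem.Dict String (PySem.Dict String Int)) (p : String × String) :
    PySem.Dict String (PySem.Dict String Int) :=
  let d := if d.contains p.1 then d else d.insert p.1 PySem.Dict.empty
  d.modify p.1 PySem.Dict.empty (fun inner =>
    inner.insert p.2 (if f p.1 == f p.2 then (1 : Int) else 0))

theorem pvStepA_eq (f : String → String) (d : PySem.Dict String (PySem.Dict String Int))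
    (a b : String) :
    pvStepA f d (a, b)
      = d.insert a ((d.getD a PySem.Dict.empty).insert b (if f a == f b then (1 : Int) else 0)) := by
  simp only [pvStepA]
  by_cases hc : d.contains a = true
  · rw [if_pos hc]; rfl
  · rw [if_neg hc]
    show (d.insert a PySem.Dict.empty).insert a _ = _
    rw [PySem.Dict.getD_insert_self, PySem.Dict.insert_insert_self,
        PySem.Dict.getD_of_not_contains _ _ (by revert hc; cases d.contains a <;> simp)]

theorem pvInnerA_char (f : String → String) (x0 : String) (rest : List String) (a : String)
    {ks : List String} (hnd : ks.Nodup) :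
    (x0 :: rest).foldl (fun d b => pvStepA f d (a, b)) (pvTab ks (pvRow f (x0 :: rest)))
      = pvTab (PySem.Set.add ks a) (pvRow f (x0 :: rest)) := by
  have hndS : (PySem.Set.ofList (x0 :: rest)).Nodup := PySem.Set.nodup_ofList _
  have hx0S : x0 ∈ PySem.Set.ofList (x0 :: rest) := by
    rw [PySem.Set.mem_ofList]; exact List.mem_cons_self
  have hsub : ∀ x ∈ rest, x ∈ PySem.Set.ofList (x0 :: rest) := by
    intro x hx; rw [PySem.Set.mem_ofList]; exact List.mem_cons_of_mem _ hx
  have hupd : PySem.Set.update (PySem.Set.ofList (x0 :: rest)) rest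
      = PySem.Set.ofList (x0 :: rest) := pvUpdate_of_subset hsub
  simp only [List.foldl_cons, pvStepA_eq]
  by_cases ha : a ∈ ks
  · rw [pvTab_getD _ hnd ha]
    have h1 : (pvRow f (x0 :: rest) a).insert x0 (if f a == f x0 then (1 : Int) else 0)
        = pvRow f (x0 :: rest) a := by
      rw [pvRow, pvTab_insert_mem _ _ hndS hx0S]
      apply pvTab_congr; intro k _; by_cases hkx : k = x0 <;> simp [hkx]
    rw [h1, pvIL]
    have h2 := pvBR (ks := PySem.Set.ofList (x0 :: rest))
      (fun b => if f a == f b then (1 : Int) else 0)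
      (fun b => if f a == f b then (1 : Int) else 0) rest hndS
    rw [pvRow] at *
    rw [h2, hupd]
    have h3 : pvTab (PySem.Set.ofList (x0 :: rest))
        (fun x => if x ∈ rest then (if f a == f x then (1 : Int) else 0)
                  else (if f a == f x then (1 : Int) else 0))
        = pvTab (PySem.Set.ofList (x0 :: rest)) (fun b => if f a == f b then (1 : Int) else 0) := by
      apply pvTab_congr; intro k _; by_cases hk : k ∈ rest <;> simp [hk]
    rw [h3, PySem.Set.add_of_mem ha, pvTab_insert_mem _ _ hnd ha]
    apply pvTab_congr; intro k _
    by_cases hk : k = a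
    · subst hk; rw [if_pos rfl]; rfl
    · rw [if_neg hk]
  · rw [PySem.Dict.getD_of_not_contains _ _
        (by rw [pvTab_contains]; exact decide_eq_false ha)]
    have he : (PySem.Dict.empty : PySem.Dict String Int)
        = pvTab [] (fun b => if f a == f b then (1 : Int) else 0) := rfl
    have h1 : pvTab [x0] (fun x => if x = x0 then (if f a == f x0 then (1 : Int) else 0)
        else (if f a == f x then (1 : Int) else 0))
        = pvTab [x0] (fun b => if f a == f b then (1 : Int) else 0) := by
      apply pvTab_congr; intro k _; by_cases hk : k = x0 <;> simp [hk]
    have h0 : (PySem.Dict.empty : PySem.Dict String Int).insert x0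
        (if f a == f x0 then (1 : Int) else 0)
        = pvTab [x0] (fun b => if f a == f b then (1 : Int) else 0) := by
      rw [he, pvTab_insert_not_mem _ _ (List.not_mem_nil), List.nil_append, h1]
    rw [h0, pvIL]
    have h2 := pvBR (ks := [x0])
      (fun b => if f a == f b then (1 : Int) else 0)
      (fun b => if f a == f b then (1 : Int) else 0) rest (List.nodup_singleton x0)
    rw [h2]
    have hupd1 : PySem.Set.update [x0] rest = PySem.Set.ofList (x0 :: rest) := by
      have : ([x0] : List String) = PySem.Set.add [] x0 := rfl
      rw [this, ← PySem.Set.update_cons, PySem.Set.update_nil_left]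
    rw [hupd1]
    have h3 : pvTab (PySem.Set.ofList (x0 :: rest))
        (fun x => if x ∈ rest then (if f a == f x then (1 : Int) else 0)
                  else (if f a == f x then (1 : Int) else 0))
        = pvRow f (x0 :: rest) a := by
      rw [pvRow]
      apply pvTab_congr; intro k _; by_cases hk : k ∈ rest <;> simp [hk]
    rw [h3, pvTab_insert_not_mem _ _ ha, PySem.Set.add_of_not_mem ha]
    apply pvTab_congr; intro k _
    by_cases hk : k = a
    · subst hk; rw [if_pos rfl]
    · rw [if_neg hk]

theorem pvOuterA (f : String → String) (x0 : String) (rest : List String) (zs : List String)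
    {ks : List String} (hnd : ks.Nodup) :
    zs.foldl (fun d a => (x0 :: rest).foldl (fun d b => pvStepA f d (a, b)) d)
        (pvTab ks (pvRow f (x0 :: rest)))
      = pvTab (PySem.Set.update ks zs) (pvRow f (x0 :: rest)) := by
  induction zs generalizing ks with
  | nil => rw [PySem.Set.update_nil, List.foldl_nil]
  | cons a zs ih =>
    rw [List.foldl_cons, pvInnerA_char f x0 rest a hnd, PySem.Set.update_cons,
        ih (PySem.Set.nodup_add _ a hnd)]

theorem pvFoldl_flatMap {α β γ : Type} (l : List α) (g : α → List β) (F : γ → β → γ) (init : γ) :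
    (l.flatMap g).foldl F init = l.foldl (fun acc a => (g a).foldl F acc) init := by
  induction l generalizing init with
  | nil => rfl
  | cons a l ih => rw [List.flatMap_cons, List.foldl_append, List.foldl_cons, ih]

-- A's dict equals the canonical table
theorem pvA_char (f : String → String) (x0 : String) (rest : List String) :
    ((x0 :: rest).flatMap (fun a => (x0 :: rest).map (fun b => (a, b)))).foldl (pvStepA f) PySem.Dict.empty
      = pvTab (PySem.Set.ofList (x0 :: rest)) (pvRow f (x0 :: rest)) := by
  rw [pvFoldl_flatMap]
  have hmap : ∀ (a : String) (acc : PySem.Dict String (PySem.Dict String Int)),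
      ((x0 :: rest).map (fun b => (a, b))).foldl (pvStepA f) acc
        = (x0 :: rest).foldl (fun d b => pvStepA f d (a, b)) acc := by
    intro a acc; rw [List.foldl_map]
  simp only [hmap]
  have he : (PySem.Dict.empty : PySem.Dict String (PySem.Dict String Int))
      = pvTab [] (pvRow f (x0 :: rest)) := rfl
  rw [he, pvOuterA f x0 rest _ List.nodup_nil, PySem.Set.update_nil_left]

-- ---- B side ----

theorem pvFams_char (f : String → String) (xs : List String) {cs : List String}
    (h : String → List String) (hnd : cs.Nodup) :
    xs.foldl (fun g l => g.modify (f l) [] (fun ms => ms ++ [l])) (pvTab cs h)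
      = pvTab (PySem.Set.update cs (xs.map f))
          (fun c => (pvTab cs h).getD c [] ++ xs.filter (fun l => f l == c)) := by
  have hmod : ∀ (g : PySem.Dict String (List String)) (l : String),
      g.modify (f l) [] (fun ms => ms ++ [l]) = g.insert (f l) (g.getD (f l) [] ++ [l]) :=
    fun _ _ => rfl
  simp only [hmod]
  induction xs generalizing cs h with
  | nil =>
    rw [List.foldl_nil, List.map_nil, PySem.Set.update_nil]
    apply pvTab_congr; intro k hk
    rw [pvTab_getD _ hnd hk, List.filter_nil, List.append_nil]
  | cons l xs ih =>
    rw [List.foldl_cons, List.map_cons, PySem.Set.update_cons]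
    by_cases hm : f l ∈ cs
    · rw [pvTab_getD _ hnd hm, pvTab_insert_mem _ _ hnd hm, ih _ hnd,
          PySem.Set.add_of_mem hm]
      apply pvTab_congr; intro c _
      by_cases hc2 : c ∈ cs
      · rw [pvTab_getD _ hnd hc2, pvTab_getD _ hnd hc2, List.filter_cons]
        by_cases he : c = f l
        · subst he; simp
        · have : (f l == c) = false := by simp; exact fun hh => he hh.symm
          simp [this, he]
      · have g1 : (pvTab cs (fun x => if x = f l then h (f l) ++ [l] else h x)).getD c []
            = [] := PySem.Dict.getD_of_not_contains _ _
              (by rw [pvTab_contains]; exact decide_eq_false hc2)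
        have g2 : (pvTab cs h).getD c []
            = [] := PySem.Dict.getD_of_not_contains _ _
              (by rw [pvTab_contains]; exact decide_eq_false hc2)
        have he : c ≠ f l := fun hh => hc2 (hh ▸ hm)
        have : (f l == c) = false := by simp; exact fun hh => he hh.symm
        rw [g1, g2, List.filter_cons, this]
        simp
    · have hnc : (pvTab cs h).contains (f l) = false := by
        rw [pvTab_contains]; exact decide_eq_false hm
      have hnd2 : (cs ++ [f l]).Nodup := by
        simp [List.nodup_append, hnd]; exact fun a ha hh => hm (hh ▸ ha)
      rw [PySem.Dict.getD_of_not_contains _ _ hnc, List.nil_append,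
          pvTab_insert_not_mem _ _ hm, ih _ hnd2, PySem.Set.add_of_not_mem hm]
      apply pvTab_congr; intro c _
      by_cases hc2 : c = f l
      · subst hc2
        rw [pvTab_getD _ hnd2 (by simp), PySem.Dict.getD_of_not_contains _ _ hnc,
            List.filter_cons, if_pos rfl, if_pos (by simp)]
        simp
      · rw [List.filter_cons]
        have : (f l == c) = false := by simp; exact fun hh => hc2 hh.symm
        rw [this]
        by_cases hc3 : c ∈ cs
        · rw [pvTab_getD _ hnd2 (by simp [hc3]), pvTab_getD _ hnd hc3, if_neg hc2]
          simp
        · have g1 : (pvTab (cs ++ [f l]) (fun x => if x = f l then [l] else h x)).getD c []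
              = [] := PySem.Dict.getD_of_not_contains _ _
                (by rw [pvTab_contains]; apply decide_eq_false; simp [hc3, hc2])
          have g2 : (pvTab cs h).getD c []
              = [] := PySem.Dict.getD_of_not_contains _ _
                (by rw [pvTab_contains]; exact decide_eq_false hc3)
          rw [g1, g2]
          simp

theorem pvInner1 (S T : List String) (g1 : String → Int) (H : String → PySem.Dict String Int)
    (l1 : String) (G : List String) (hndS : S.Nodup) (hl1 : l1 ∈ S) (hH : H l1 = pvTab T g1) :
    G.foldl (fun r l2 => r.modify l1 PySem.Dict.empty (fun inner => inner.insert l2 (1 : Int)))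
        (pvTab S H)
      = (pvTab S H).insert l1 (G.foldl (fun i b => i.insert b (1 : Int)) (H l1)) := by
  have hmod2 : ∀ (r : PySem.Dict String (PySem.Dict String Int)) (k b : String),
      r.modify k PySem.Dict.empty (fun inner => inner.insert b (1 : Int))
        = r.insert k ((r.getD k PySem.Dict.empty).insert b (1 : Int)) := fun _ _ _ => rfl
  simp only [hmod2]
  cases G with
  | nil =>
    rw [List.foldl_nil, List.foldl_nil, pvTab_insert_mem _ _ hndS hl1]
    symm; apply pvTab_congr; intro k _
    by_cases hk : k = l1
    · subst hk; rw [if_pos rfl]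
    · rw [if_neg hk]
  | cons b bs =>
    rw [List.foldl_cons, pvTab_getD _ hndS hl1, List.foldl_cons]
    have := pvIL l1 (fun _ => (1 : Int)) bs (pvTab S H) ((H l1).insert b (1 : Int))
    simp only [this]

theorem pvML (S T G ms : List String) (g : String → String → Int)
    (hndS : S.Nodup) (hndT : T.Nodup) (hGT : ∀ x ∈ G, x ∈ T) (hms : ∀ x ∈ ms, x ∈ S) :
    ms.foldl (fun r l1 =>
        G.foldl (fun r l2 => r.modify l1 PySem.Dict.empty (fun inner => inner.insert l2 (1 : Int))) r)
      (pvTab S (fun a => pvTab T (g a)))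
      = pvTab S (fun a => pvTab T (fun b => if a ∈ ms ∧ b ∈ G then 1 else g a b)) := by
  induction ms generalizing g with
  | nil =>
    rw [List.foldl_nil]
    apply pvTab_congr; intro a _
    apply pvTab_congr; intro b _
    simp
  | cons l1 ms ih =>
    have hl1S : l1 ∈ S := hms l1 List.mem_cons_self
    rw [List.foldl_cons,
        pvInner1 S T (g l1) (fun a => pvTab T (g a)) l1 G hndS hl1S rfl]
    have h2 := pvBR (ks := T) (g l1) (fun _ => (1 : Int)) G hndT
    rw [h2, pvUpdate_of_subset hGT, pvTab_insert_mem _ _ hndS hl1S]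
    have h3 : pvTab S (fun x => if x = l1
          then pvTab T (fun y => if y ∈ G then (1 : Int) else g l1 y)
          else pvTab T (g x))
        = pvTab S (fun a => pvTab T (fun b => if a = l1 ∧ b ∈ G then 1 else g a b)) := by
      apply pvTab_congr; intro a _
      by_cases ha : a = l1
      · subst ha; rw [if_pos rfl]
        apply pvTab_congr; intro b _
        by_cases hb : b ∈ G <;> simp [hb]
      · rw [if_neg ha]
        apply pvTab_congr; intro b _
        simp [ha]
    rw [h3, ih _ (fun x hx => hms x (List.mem_cons_of_mem _ hx))]
    apply pvTab_congr; intro a _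
    apply pvTab_congr; intro b _
    by_cases h1 : a ∈ ms <;> by_cases h2 : b ∈ G <;> by_cases h4 : a = l1 <;>
      simp [h1, h2, h4]

theorem pvOL (f : String → String) (xs : List String) (S : List String) (cs : List String)
    (g : String → String → Int) (hndS : S.Nodup) (hxsS : ∀ x ∈ xs, x ∈ S) :
    cs.foldl (fun r c =>
        (xs.filter (fun l => f l == c)).foldl (fun r l1 =>
          (xs.filter (fun l => f l == c)).foldl
            (fun r l2 => r.modify l1 PySem.Dict.empty (fun inner => inner.insert l2 (1 : Int))) r) r)
      (pvTab S (fun a => pvTab S (g a)))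
      = pvTab S (fun a => pvTab S (fun b =>
          if ∃ c ∈ cs, (a ∈ xs ∧ f a = c) ∧ (b ∈ xs ∧ f b = c) then 1 else g a b)) := by
  induction cs generalizing g with
  | nil =>
    rw [List.foldl_nil]
    apply pvTab_congr; intro a _
    apply pvTab_congr; intro b _
    simp
  | cons c cs ih =>
    rw [List.foldl_cons,
        pvML S S (xs.filter (fun l => f l == c)) (xs.filter (fun l => f l == c)) g hndS hndS
          (fun x hx => hxsS x (List.mem_of_mem_filter hx))
          (fun x hx => hxsS x (List.mem_of_mem_filter hx)),
        ih _]
    apply pvTab_congr; intro a _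
    apply pvTab_congr; intro b _
    simp only [List.mem_filter, beq_iff_eq]
    by_cases h1 : ∃ c' ∈ cs, (a ∈ xs ∧ f a = c') ∧ (b ∈ xs ∧ f b = c')
    · obtain ⟨c', hc', hp⟩ := h1
      rw [if_pos ⟨c', hc', hp⟩, if_pos ⟨c', List.mem_cons_of_mem _ hc', hp⟩]
    · rw [if_neg h1]
      by_cases h2 : (a ∈ xs ∧ f a = c) ∧ (b ∈ xs ∧ f b = c)
      · rw [if_pos h2, if_pos ⟨c, List.mem_cons_self, h2⟩]
      · rw [if_neg h2, if_neg ?_]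
        rintro ⟨c', hc', hp⟩
        rcases List.mem_cons.mp hc' with h | h
        · exact h2 (h ▸ hp)
        · exact h1 ⟨c', h, hp⟩

-- B's dict equals the canonical table
theorem pvB_char (f : String → String) (xs : List String) :
    (let fams := xs.foldl (fun g l => g.modify (f l) [] (fun ms => ms ++ [l])) PySem.Dict.empty
     let result := xs.foldl
        (fun r l1 => r.insert l1 (xs.foldl (fun i l2 => i.insert l2 (0 : Int)) PySem.Dict.empty))
        PySem.Dict.empty
     fams.values.foldl
       (fun r members =>
         members.foldl (fun r l1 =>
           members.foldl (fun r l2 => r.modify l1 PySem.Dict.empty (fun inner => inner.insert l2 (1 : Int))) r) r)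
       result)
      = pvTab (PySem.Set.ofList xs) (pvRow f xs) := by
  have hvals : ∀ {ν : Type} (ks : List String) (h : String → ν), (pvTab ks h).values = ks.map h := by
    intro ν ks h; simp [pvTab, PySem.Dict.values]
  have hfams : xs.foldl (fun g l => g.modify (f l) [] (fun ms => ms ++ [l])) PySem.Dict.empty
      = pvTab (PySem.Set.ofList (xs.map f)) (fun c => xs.filter (fun l => f l == c)) := by
    have he : (PySem.Dict.empty : PySem.Dict String (List String))
        = pvTab [] (fun _ => []) := rfl
    rw [he, pvFams_char f xs _ List.nodup_nil, PySem.Set.update_nil_left]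
    apply pvTab_congr; intro c _
    rw [PySem.Dict.getD_of_not_contains _ _ (by rw [pvTab_contains]; simp), List.nil_append]
  have hinner : xs.foldl (fun i l2 => i.insert l2 (0 : Int)) PySem.Dict.empty
      = pvTab (PySem.Set.ofList xs) (fun _ => (0 : Int)) := by
    have he : (PySem.Dict.empty : PySem.Dict String Int)
        = pvTab [] (fun _ => (0 : Int)) := rfl
    rw [he, pvBR (ks := []) (fun _ => (0 : Int)) (fun _ => (0 : Int)) xs List.nodup_nil,
        PySem.Set.update_nil_left]
    apply pvTab_congr; intro k _; simp
  have hres0 : xs.foldl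
      (fun r l1 => r.insert l1 (xs.foldl (fun i l2 => i.insert l2 (0 : Int)) PySem.Dict.empty))
      PySem.Dict.empty
      = pvTab (PySem.Set.ofList xs) (fun a => pvTab (PySem.Set.ofList xs) (fun _ => (0 : Int))) := by
    simp only [hinner]
    have he : (PySem.Dict.empty : PySem.Dict String (PySem.Dict String Int))
        = pvTab [] (fun _ => pvTab (PySem.Set.ofList xs) (fun _ => (0 : Int))) := rfl
    rw [he, pvBR (ks := []) _ (fun _ => pvTab (PySem.Set.ofList xs) (fun _ => (0 : Int))) xs
          List.nodup_nil, PySem.Set.update_nil_left]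
    apply pvTab_congr; intro k _; simp
  show ((xs.foldl (fun g l => g.modify (f l) [] (fun ms => ms ++ [l])) PySem.Dict.empty).values).foldl
      _ (xs.foldl _ PySem.Dict.empty) = _
  rw [hfams, hres0, hvals, List.foldl_map,
      pvOL f xs (PySem.Set.ofList xs) (PySem.Set.ofList (xs.map f)) (fun _ _ => (0 : Int))
        (PySem.Set.nodup_ofList _) (fun x hx => (PySem.Set.mem_ofList _ _).mpr hx)]
  apply pvTab_congr; intro a haS
  rw [pvRow]
  apply pvTab_congr; intro b hbS
  have ha : a ∈ xs := (PySem.Set.mem_ofList _ _).mp haS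
  have hb : b ∈ xs := (PySem.Set.mem_ofList _ _).mp hbS
  by_cases h : f a = f b
  · rw [if_pos ⟨f a, (PySem.Set.mem_ofList _ _).mpr (List.mem_map.mpr ⟨a, ha, rfl⟩),
        ⟨ha, rfl⟩, ⟨hb, h.symm⟩⟩]
    simp [h]
  · rw [if_neg ?_]
    · simp [h]
    · rintro ⟨c, _, ⟨_, hfa⟩, ⟨_, hfb⟩⟩
      exact h (hfa.trans hfb.symm)

-- ===== VERDICT (by name: the statement is the Claim_ definition above) =====
theorem get_lang2lang_family_dict_spec : Claim_equal_get_lang2lang_family_dict := by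
  intro xs _ _
  unfold Spec_get_lang2lang_family_dict
  cases xs with
  | nil => rfl
  | cons x0 rest =>
    have hA := pvA_char (fun l => PySem.Dict.getD pvLang2fam l "") x0 rest
    have hB := pvB_char (fun l => PySem.Dict.getD pvLang2fam l "") (x0 :: rest)
    exact congrArg (fun d : PySem.Dict String (PySem.Dict String Int) =>
      d.items.map (fun q => (q.1, q.2.items))) (hA.trans hB.symm)
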